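-- pv_equiv track=rewrite | github.com/Ponynie/AlgoDsgnLabChula | lab 1/gcd.py | FindGCD2
-- ===== SOURCE A (Python) =====
-- def FindGCD2(m, n):
--     m_factor = _prime_factorization(m)
--     n_factor = _prime_factorization(n)
--     common_factor = m_factor.intersection(n_factor)
--     product = 1
--     for i in common_factor:
--         product *= i
--     return product
--
-- def _prime_factorization(n):
--     factor = set()
--     for i in range(2, n + 1):
--         if n % i == 0:
--             factor.add(i)
--     for i in list(factor):
--         for j in range(2, int(i/2) + 1):
--             if i % j == 0:
--                 factor.remove(i)
--                 break
--     return factor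
-- ===== SOURCE B (Python) =====
-- def FindGCD2(m, n):
--     # product of the distinct common prime factors of m and n:
--     # Euclid's gcd, then trial division of the gcd up to its square root
--     if m < 2 or n < 2:
--         return 1
--     a, b = m, n
--     while b:
--         a, b = b, a % b
--     g = a
--     product = 1
--     d = 2
--     while d * d <= g:
--         if g % d == 0:
--             product *= d
--             while g % d == 0:
--                 g //= d
--         d += 1
--     if g > 1:
--         product *= g
--     return product
-- ===== Notes on version B (the rewrite author's own statement) =====
-- stated objective: faster
-- what changed: Instead of enumerating every divisor of m and of n up to the number itself, primality-testing each, and intersecting the two sets, B computes gcd(m,n) by Euclid's algorithm and multiplies the distinct primes found by trial division of the gcd up to its square root.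
import Mathlib
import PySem

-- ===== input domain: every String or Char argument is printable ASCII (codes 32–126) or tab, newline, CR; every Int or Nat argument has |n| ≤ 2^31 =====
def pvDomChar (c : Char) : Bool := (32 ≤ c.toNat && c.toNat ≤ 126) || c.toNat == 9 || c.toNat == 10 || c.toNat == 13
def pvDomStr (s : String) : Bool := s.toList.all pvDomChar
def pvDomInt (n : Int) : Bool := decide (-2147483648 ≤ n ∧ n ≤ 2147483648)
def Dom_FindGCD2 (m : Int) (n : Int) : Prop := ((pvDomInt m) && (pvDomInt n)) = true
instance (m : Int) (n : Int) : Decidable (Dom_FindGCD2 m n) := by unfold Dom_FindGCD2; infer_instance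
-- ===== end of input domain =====

-- B replaces A's two full divisor enumerations (one scan up to m, one up to n, plus a primality
-- scan per divisor and a set intersection) by Euclid's gcd followed by trial division of the gcd
-- up to its square root (objective: faster).

-- ===== PORT A =====
-- inner scan "for j in range(2, int(i/2)+1): if i % j == 0: factor.remove(i); break";
-- int(i/2) on the nonnegative i reached here is floor division (exact, since |i| ≤ 2^31 < 2^53)
def pfComposite (i : Int) : Bool :=
  (PySem.List.pyRange 2 (PySem.Int.floordiv i 2 + 1) 1).any (fun j => PySem.Int.mod i j == 0)

def primeFactorization (n : Int) : PySem.Set Int :=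
  let factor : PySem.Set Int :=
    (PySem.List.pyRange 2 (n + 1) 1).foldl
      (fun s i => if PySem.Int.mod n i == 0 then PySem.Set.add s i else s) PySem.Set.empty
  -- "for i in list(factor): … factor.remove(i)"; KeyError unreachable: each i is an element of
  -- the snapshot of the set and is removed at most once
  factor.foldl (fun s i => if pfComposite i then (PySem.Set.remove? s i).getD s else s) factor

def FindGCD2 (m : Int) (n : Int) : Int :=
  let m_factor := primeFactorization m
  let n_factor := primeFactorization n
  let common_factor := PySem.Set.inter m_factor n_factor
  common_factor.foldl (fun product i => product * i) 1

-- ===== PORT B =====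
-- Each while-loop is ported as structural recursion on a fuel argument; the fuel passed at the
-- call site is proved sufficient below (pvEuclid / pvStrip_spec / pvTrial), so it is only a
-- totality guard, never reached.

-- 'while b: a, b = b, a % b'
def euclidLoop : Nat → Int → Int → Int
  | 0, a, _ => a
  | fuel + 1, a, b => if b ≠ 0 then euclidLoop fuel b (PySem.Int.mod a b) else a

-- 'while g % d == 0: g //= d'
def stripLoop : Nat → Int → Int → Int
  | 0, g, _ => g
  | fuel + 1, g, d =>
    if PySem.Int.mod g d == 0 then stripLoop fuel (PySem.Int.floordiv g d) d else g

-- 'while d * d <= g: …'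
def trialLoop : Nat → Int → Int → Int → Int × Int
  | 0, g, _, product => (g, product)
  | fuel + 1, g, d, product =>
    if d * d ≤ g then
      if PySem.Int.mod g d == 0 then
        trialLoop fuel (stripLoop g.toNat g d) (d + 1) (product * d)
      else
        trialLoop fuel g (d + 1) product
    else (g, product)

def FindGCD2_alt (m : Int) (n : Int) : Int :=
  if m < 2 ∨ n < 2 then 1
  else
    let g := euclidLoop (n.toNat + 1) m n
    let r := trialLoop (2 * g.toNat + 1) g 2 1
    if r.1 > 1 then r.2 * r.1 else r.2

-- ===== PRECONDITION & SPEC =====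
def Spec_FindGCD2 (m : Int) (n : Int) (out : Int) : Prop := out = FindGCD2_alt m n
instance (m : Int) (n : Int) (out : Int) : Decidable (Spec_FindGCD2 m n out) := by unfold Spec_FindGCD2; infer_instance

-- ===== CLAIM (what is proved, stated in full; the proofs are below) =====
def Claim_equal_FindGCD2 : Prop := ∀ (m : Int) (n : Int), Dom_FindGCD2 m n → Spec_FindGCD2 m n (FindGCD2 m n)

-- ===== LEMMAS AND PROOFS =====

theorem pvFoldAdd (p : Int → Bool) (l : List Int) (s : PySem.Set Int) (hs : s.Nodup) :
    (l.foldl (fun s i => if p i then PySem.Set.add s i else s) s).Nodup ∧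
    (∀ x, x ∈ l.foldl (fun s i => if p i then PySem.Set.add s i else s) s ↔
      x ∈ s ∨ (x ∈ l ∧ p x = true)) := by
  induction l generalizing s with
  | nil => simp [hs]
  | cons i l ih =>
    simp only [List.foldl_cons]
    by_cases hp : p i = true
    · rw [if_pos hp]
      obtain ⟨h1, h2⟩ := ih (PySem.Set.add s i) (PySem.Set.nodup_add s i hs)
      refine ⟨h1, fun x => ?_⟩
      rw [h2 x, PySem.Set.mem_add]
      constructor
      · rintro ((hx | rfl) | hx)
        · exact Or.inl hx
        · exact Or.inr ⟨List.mem_cons_self .., hp⟩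
        · exact Or.inr ⟨List.mem_cons_of_mem _ hx.1, hx.2⟩
      · rintro (hx | ⟨hm, hpx⟩)
        · exact Or.inl (Or.inl hx)
        · rcases List.mem_cons.mp hm with rfl | hm
          · exact Or.inl (Or.inr rfl)
          · exact Or.inr ⟨hm, hpx⟩
    · rw [if_neg hp]
      obtain ⟨h1, h2⟩ := ih s hs
      refine ⟨h1, fun x => ?_⟩
      rw [h2 x]
      constructor
      · rintro (hx | hx)
        · exact Or.inl hx
        · exact Or.inr ⟨List.mem_cons_of_mem _ hx.1, hx.2⟩
      · rintro (hx | ⟨hm, hpx⟩)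
        · exact Or.inl hx
        · rcases List.mem_cons.mp hm with rfl | hm
          · rw [hpx] at hp; exact absurd rfl hp
          · exact Or.inr ⟨hm, hpx⟩

theorem pvFoldRemove (c : Int → Bool) (l : List Int) (s : PySem.Set Int) (hs : s.Nodup) :
    (l.foldl (fun s i => if c i then (PySem.Set.remove? s i).getD s else s) s).Nodup ∧
    (∀ x, x ∈ l.foldl (fun s i => if c i then (PySem.Set.remove? s i).getD s else s) s ↔
      x ∈ s ∧ ∀ i ∈ l, c i = true → x ≠ i) := by
  induction l generalizing s with
  | nil => simp [hs]
  | cons i l ih =>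
    simp only [List.foldl_cons]
    by_cases hc : c i = true
    · rw [if_pos hc]
      have hstep : (PySem.Set.remove? s i).getD s = if i ∈ s then PySem.Set.discard s i else s := by
        by_cases hmem : i ∈ s
        · rw [PySem.Set.remove?_of_mem hmem]; simp [hmem]
        · rw [(PySem.Set.remove?_eq_none_iff s i).mpr hmem]; simp [hmem]
      rw [hstep]
      by_cases hmem : i ∈ s
      · simp only [hmem, if_true]
        obtain ⟨h1, h2⟩ := ih (PySem.Set.discard s i) (PySem.Set.nodup_discard s i hs)
        refine ⟨h1, fun x => ?_⟩
        rw [h2 x, PySem.Set.mem_discard]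
        constructor
        · rintro ⟨⟨hx, hne⟩, hall⟩
          refine ⟨hx, fun j hj hcj => ?_⟩
          rcases List.mem_cons.mp hj with rfl | hj
          · exact hne
          · exact hall j hj hcj
        · rintro ⟨hx, hall⟩
          exact ⟨⟨hx, hall i (List.mem_cons_self ..) hc⟩,
            fun j hj hcj => hall j (List.mem_cons_of_mem _ hj) hcj⟩
      · simp only [hmem, if_false]
        obtain ⟨h1, h2⟩ := ih s hs
        refine ⟨h1, fun x => ?_⟩
        rw [h2 x]
        constructor
        · rintro ⟨hx, hall⟩
          refine ⟨hx, fun j hj hcj => ?_⟩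
          rcases List.mem_cons.mp hj with rfl | hj
          · rintro rfl; exact hmem hx
          · exact hall j hj hcj
        · rintro ⟨hx, hall⟩
          exact ⟨hx, fun j hj hcj => hall j (List.mem_cons_of_mem _ hj) hcj⟩
    · rw [if_neg hc]
      obtain ⟨h1, h2⟩ := ih s hs
      refine ⟨h1, fun x => ?_⟩
      rw [h2 x]
      constructor
      · rintro ⟨hx, hall⟩
        refine ⟨hx, fun j hj hcj => ?_⟩
        rcases List.mem_cons.mp hj with rfl | hj
        · rw [hcj] at hc; exact absurd rfl hc
        · exact hall j hj hcj
      · rintro ⟨hx, hall⟩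
        exact ⟨hx, fun j hj hcj => hall j (List.mem_cons_of_mem _ hj) hcj⟩
theorem pvDvdCast (x y : Int) (hx : 0 ≤ x) (hy : 0 ≤ y) : x ∣ y ↔ x.toNat ∣ y.toNat := by
  rw [← Int.natCast_dvd_natCast]
  simp [Int.toNat_of_nonneg hx, Int.toNat_of_nonneg hy]

theorem pvCompositeIff (i : Int) (hi : 2 ≤ i) : pfComposite i = true ↔ ¬ Nat.Prime i.toNat := by
  unfold pfComposite
  rw [List.any_eq_true]
  rw [PySem.Int.floordiv_eq_ediv_of_pos (by omega : (0:Int) < 2)]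
  constructor
  · rintro ⟨j, hj, hpj⟩
    rw [PySem.List.mem_pyRange_one] at hj
    have hjd : j ∣ i := (PySem.Int.mod_eq_zero_iff_dvd i j).mp (by simpa using hpj)
    intro hp
    have hjn : j.toNat ∣ i.toNat := (pvDvdCast j i (by omega) (by omega)).mp hjd
    rcases (Nat.Prime.eq_one_or_self_of_dvd hp j.toNat hjn) with h1 | h2
    · omega
    · omega
  · intro hnp
    obtain ⟨q, hqd, hq2, hqlt⟩ := Nat.exists_dvd_of_not_prime2 (by omega) hnp
    obtain ⟨c, hc⟩ := hqd
    have hc2 : 2 ≤ c := by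
      rcases Nat.lt_or_ge c 2 with h | h
      · interval_cases c <;> omega
      · exact h
    refine ⟨(q : Int), ?_, ?_⟩
    · rw [PySem.List.mem_pyRange_one]
      constructor
      · exact_mod_cast hq2
      · have h2q : 2 * q ≤ i.toNat := by nlinarith
        omega
    · simp only [beq_iff_eq]
      rw [PySem.Int.mod_eq_zero_iff_dvd, pvDvdCast _ i (by omega) (by omega), Int.toNat_natCast]
      exact ⟨c, hc⟩

def pvFactor0 (n : Int) : PySem.Set Int :=
  (PySem.List.pyRange 2 (n + 1) 1).foldl
    (fun s i => if PySem.Int.mod n i == 0 then PySem.Set.add s i else s) PySem.Set.empty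

theorem pvFactor0_spec (n : Int) :
    (pvFactor0 n).Nodup ∧ ∀ x, x ∈ pvFactor0 n ↔ 2 ≤ x ∧ x < n + 1 ∧ x ∣ n := by
  obtain ⟨h1, h2⟩ := pvFoldAdd (fun i => PySem.Int.mod n i == 0)
    (PySem.List.pyRange 2 (n + 1) 1) PySem.Set.empty (by simp [PySem.Set.empty])
  refine ⟨h1, fun x => ?_⟩
  rw [pvFactor0, h2 x]
  simp only [PySem.Set.empty, List.not_mem_nil, false_or, PySem.List.mem_pyRange_one,
    beq_iff_eq, PySem.Int.mod_eq_zero_iff_dvd]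
  tauto

theorem pvMemPF (n : Int) :
    (primeFactorization n).Nodup ∧
    ∀ x, x ∈ primeFactorization n ↔ 2 ≤ x ∧ x < n + 1 ∧ x ∣ n ∧ Nat.Prime x.toNat := by
  obtain ⟨hFn, hFm⟩ := pvFactor0_spec n
  have hdef : primeFactorization n =
      (pvFactor0 n).foldl
        (fun s i => if pfComposite i then (PySem.Set.remove? s i).getD s else s) (pvFactor0 n) := rfl
  obtain ⟨h1, h2⟩ := pvFoldRemove pfComposite (pvFactor0 n) (pvFactor0 n) hFn
  rw [hdef]
  refine ⟨h1, fun x => ?_⟩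
  rw [h2 x]
  constructor
  · rintro ⟨hx, hall⟩
    obtain ⟨hx2, hxn, hxd⟩ := (hFm x).mp hx
    refine ⟨hx2, hxn, hxd, ?_⟩
    by_contra hnp
    exact hall x hx ((pvCompositeIff x hx2).mpr hnp) rfl
  · rintro ⟨hx2, hxn, hxd, hp⟩
    refine ⟨(hFm x).mpr ⟨hx2, hxn, hxd⟩, fun i hi hci => ?_⟩
    intro he
    subst he
    exact (pvCompositeIff _ hx2).mp hci hp


def pvRad (g : Nat) : Nat := ∏ p ∈ g.primeFactors, p

theorem pvEuclid : ∀ (fuel : Nat) (a b : Int), b.toNat < fuel → 0 ≤ a → 0 ≤ b →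
    euclidLoop fuel a b = (Int.gcd a b : Int) := by
  intro fuel
  induction fuel with
  | zero => intro a b hN ha hb; omega
  | succ N ih =>
    intro a b hN ha hb
    simp only [euclidLoop]
    split_ifs with h
    · have hbpos : 0 < b := by omega
      have hmod : PySem.Int.mod a b = a % b := PySem.Int.mod_eq_emod_of_pos hbpos
      have h1 : 0 ≤ a % b := Int.emod_nonneg a (by omega)
      have h2 : a % b < b := Int.emod_lt_of_pos a hbpos
      rw [hmod, ih b (a % b) (by omega) (by omega)]
      · congr 1
        rw [Int.gcd, Int.gcd]
        have hA : a.natAbs = a.toNat := by omega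
        have hB : b.natAbs = b.toNat := by omega
        have hAB : (a % b).natAbs = a.toNat % b.toNat := by
          have : a % b = (a.toNat : Int) % (b.toNat : Int) := by
            rw [Int.toNat_of_nonneg ha, Int.toNat_of_nonneg hb]
          rw [this, ← Int.natCast_emod, Int.natAbs_natCast]
        rw [hA, hB, hAB]
        rw [Nat.gcd_comm b.toNat _, ← Nat.gcd_rec]
        exact Nat.gcd_comm _ _
      · exact h1
    · simp only [ne_eq, not_not] at h
      subst h
      simp [Int.gcd, Int.natAbs_of_nonneg ha]

theorem pvStrip_spec : ∀ (fuel : Nat) (g d : Int), g.toNat ≤ fuel → 2 ≤ d → 0 < g →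
    ∃ k : Nat, g = d ^ k * stripLoop fuel g d ∧ ¬ (d ∣ stripLoop fuel g d) := by
  intro fuel
  induction fuel with
  | zero => intro g d hN hd hg; omega
  | succ N ih =>
    intro g d hN hd hg
    simp only [stripLoop]
    split_ifs with h
    · have hdvd : d ∣ g := (PySem.Int.mod_eq_zero_iff_dvd g d).mp (by simpa using h)
      rw [PySem.Int.floordiv_eq_ediv_of_pos (by omega : (0:Int) < d)]
      have heq : d * (g / d) = g := Int.mul_ediv_cancel' hdvd
      have h0 : 0 < g / d := by nlinarith
      have h1 : 2 * (g / d) ≤ g := by nlinarith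
      obtain ⟨k, hk, hnd⟩ := ih (g / d) d (by omega) hd h0
      exact ⟨k + 1, by rw [pow_succ]; nlinarith [hk], hnd⟩
    · have hnd : ¬ (d ∣ g) := fun hdvd =>
        h (by simp [(PySem.Int.mod_eq_zero_iff_dvd g d).mpr hdvd])
      exact ⟨0, by ring_nf, hnd⟩

theorem pvStrip_exists (g d : Int) (hd : 2 ≤ d) (hg : 0 < g) :
    ∃ k : Nat, g = d ^ k * stripLoop g.toNat g d ∧ ¬ (d ∣ stripLoop g.toNat g d) :=
  pvStrip_spec g.toNat g d le_rfl hd hg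

theorem pvStrip_bounds (g d : Int) (hd : 2 ≤ d) (hg : 0 < g) (hdvd : d ∣ g) :
    0 < stripLoop g.toNat g d ∧ 2 * stripLoop g.toNat g d ≤ g := by
  obtain ⟨k, hk, hnd⟩ := pvStrip_exists g d hd hg
  have hdk : (0:Int) < d ^ k := pow_pos (by omega) k
  have hs : 0 < stripLoop g.toNat g d := by nlinarith
  refine ⟨hs, ?_⟩
  have hk1 : 1 ≤ k := by
    rcases Nat.eq_zero_or_pos k with rfl | h1
    · exfalso
      apply hnd
      have hgs : g = stripLoop g.toNat g d := by simpa using hk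
      exact hgs ▸ hdvd
    · omega
  have hdk2 : (2:Int) ≤ d ^ k := by
    calc (2:Int) ≤ d := hd
    _ = d ^ 1 := (pow_one d).symm
    _ ≤ d ^ k := pow_le_pow_right₀ (by omega) hk1
  nlinarith

theorem pvRadMul (d g : Nat) (k : Nat) (hd : d.Prime) (hk : 1 ≤ k) (hg : g ≠ 0)
    (hnd : ¬ d ∣ g) : pvRad (d ^ k * g) = d * pvRad g := by
  unfold pvRad
  rw [Nat.primeFactors_mul (pow_ne_zero k hd.pos.ne') hg, Nat.primeFactors_prime_pow (by omega) hd]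
  have hdnot : d ∉ g.primeFactors := by
    rw [Nat.mem_primeFactors]
    rintro ⟨-, hdd, -⟩
    exact hnd hdd
  rw [Finset.singleton_union, Finset.prod_insert hdnot]

theorem pvTrial : ∀ (fuel : Nat) (g d acc : Int), (2 * g - d).toNat < fuel → 1 ≤ g → 2 ≤ d →
    (∀ p : Nat, p.Prime → (p : Int) ∣ g → d ≤ (p : Int)) →
    (if (trialLoop fuel g d acc).1 > 1 then (trialLoop fuel g d acc).2 * (trialLoop fuel g d acc).1
     else (trialLoop fuel g d acc).2) = acc * (pvRad g.toNat : Int) := by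
  intro fuel
  induction fuel with
  | zero =>
    intro g d acc hN hg hd hinv
    omega
  | succ N ih =>
    intro g d acc hN hg hd hinv
    by_cases hgg : d * d ≤ g
    · by_cases hm : (PySem.Int.mod g d == 0) = true
      -- d divides g: strip it out
      · have hstep : trialLoop (N + 1) g d acc =
            trialLoop N (stripLoop g.toNat g d) (d + 1) (acc * d) := by
          simp only [trialLoop]
          rw [if_pos hgg, if_pos hm]
        have hdvd : d ∣ g := (PySem.Int.mod_eq_zero_iff_dvd g d).mp (by simpa using hm)
        have hdprime : Nat.Prime d.toNat := by
          rw [Nat.prime_def_minFac]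
          refine ⟨by omega, ?_⟩
          have hq := Nat.minFac_prime (by omega : d.toNat ≠ 1)
          have hqd : d.toNat.minFac ∣ d.toNat := Nat.minFac_dvd _
          have hqg : ((d.toNat.minFac : Nat) : Int) ∣ g := by
            refine dvd_trans ?_ hdvd
            rw [pvDvdCast _ d (by omega) (by omega), Int.toNat_natCast]
            exact hqd
          have hge := hinv _ hq hqg
          have hle : d.toNat.minFac ≤ d.toNat := Nat.minFac_le (by omega)
          omega
        obtain ⟨k, hk, hnds⟩ := pvStrip_exists g d (by omega) (by omega)
        obtain ⟨hs0, hs2⟩ := pvStrip_bounds g d (by omega) (by omega) hdvd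
        have hk1 : 1 ≤ k := by
          rcases Nat.eq_zero_or_pos k with rfl | h1
          · exfalso; apply hnds; simp at hk; exact hk ▸ hdvd
          · omega
        have hsd : stripLoop g.toNat g d ∣ g := Dvd.intro_left _ hk.symm
        have hinv' : ∀ p : Nat, p.Prime → (p : Int) ∣ stripLoop g.toNat g d →
            d + 1 ≤ (p : Int) := by
          intro p hp hps
          have h1 := hinv p hp (hps.trans hsd)
          have hne : (p : Int) ≠ d := by
            rintro rfl
            exact hnds hps
          omega
        have hdg : d ≤ g := by nlinarith
        have hrec := ih (stripLoop g.toNat g d) (d + 1) (acc * d) (by omega) (by omega)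
          (by omega) hinv'
        have hgnat : g.toNat = d.toNat ^ k * (stripLoop g.toNat g d).toNat := by
          have : ((d.toNat ^ k * (stripLoop g.toNat g d).toNat : Nat) : Int) = g := by
            push_cast
            rw [Int.toNat_of_nonneg (by omega : (0:Int) ≤ d),
              Int.toNat_of_nonneg (by omega : (0:Int) ≤ stripLoop g.toNat g d)]
            omega
          omega
        have hndnat : ¬ d.toNat ∣ (stripLoop g.toNat g d).toNat := by
          intro hc
          apply hnds
          rw [pvDvdCast d (stripLoop g.toNat g d) (by omega) (by omega)]
          exact hc
        have hrad : pvRad g.toNat = d.toNat * pvRad (stripLoop g.toNat g d).toNat := by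
          conv_lhs => rw [hgnat]
          exact pvRadMul d.toNat (stripLoop g.toNat g d).toNat k hdprime hk1 (by omega) hndnat
        rw [hstep, hrec, hrad]
        push_cast
        rw [Int.toNat_of_nonneg (by omega : (0:Int) ≤ d)]
        ring
      -- d does not divide g: move on
      · have hstep : trialLoop (N + 1) g d acc = trialLoop N g (d + 1) acc := by
          simp only [trialLoop]
          rw [if_pos hgg, if_neg hm]
        have hnd : ¬ d ∣ g := fun hc =>
          hm (by simp [(PySem.Int.mod_eq_zero_iff_dvd g d).mpr hc])
        have hdg : d ≤ g := by nlinarith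
        have hinv' : ∀ p : Nat, p.Prime → (p : Int) ∣ g → d + 1 ≤ (p : Int) := by
          intro p hp hpg
          have h1 := hinv p hp hpg
          have hne : (p : Int) ≠ d := by
            rintro rfl
            exact hnd hpg
          omega
        rw [hstep]
        exact ih g (d + 1) acc (by omega) hg (by omega) hinv'
    -- loop ends: g is 1 or prime
    · have hstep : trialLoop (N + 1) g d acc = (g, acc) := by
        simp only [trialLoop]
        rw [if_neg hgg]
      have hdd : g < d * d := by omega
      rw [hstep]
      rcases eq_or_lt_of_le hg with heq | hgt
      · subst heq
        norm_num [pvRad]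
      · have hgprime : Nat.Prime g.toNat := by
          by_contra hnp
          have hmf := Nat.minFac_sq_le_self (by omega : 0 < g.toNat) hnp
          have hq := Nat.minFac_prime (by omega : g.toNat ≠ 1)
          have hqg : ((g.toNat.minFac : Nat) : Int) ∣ g := by
            have := Nat.minFac_dvd g.toNat
            rw [pvDvdCast _ g (by omega) (by omega), Int.toNat_natCast]
            exact this
          have hge := hinv _ hq hqg
          have hsq : (g.toNat.minFac : Int) * (g.toNat.minFac : Int) ≤ (g.toNat : Int) := by
            exact_mod_cast (by nlinarith [hmf] : g.toNat.minFac * g.toNat.minFac ≤ g.toNat)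
          have hgc : (g.toNat : Int) = g := Int.toNat_of_nonneg (by omega)
          nlinarith
        have hradg : pvRad g.toNat = g.toNat := by
          unfold pvRad
          rw [Nat.Prime.primeFactors hgprime, Finset.prod_singleton]
        have hgc : ((g.toNat : Nat) : Int) = g := Int.toNat_of_nonneg (by omega)
        simp only [if_pos (show ((g : Int), acc).1 > 1 from hgt), hradg, hgc]

theorem pvProdA (m n : Int) (hm : 2 ≤ m) (hn : 2 ≤ n) :
    FindGCD2 m n = (pvRad (Nat.gcd m.toNat n.toNat) : Int) := by
  have hG0 : Nat.gcd m.toNat n.toNat ≠ 0 := by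
    intro h
    have := Nat.eq_zero_of_gcd_eq_zero_left h
    omega
  have hdef : FindGCD2 m n =
      (PySem.Set.inter (primeFactorization m) (primeFactorization n)).foldl
        (fun product i => product * i) 1 := rfl
  set L := PySem.Set.inter (primeFactorization m) (primeFactorization n) with hL
  have hNod : L.Nodup := PySem.Set.nodup_inter _ _ (pvMemPF m).1
  have hmem : ∀ x, x ∈ L ↔
      2 ≤ x ∧ x ∣ m ∧ x ∣ n ∧ Nat.Prime x.toNat := by
    intro x
    rw [hL, PySem.Set.mem_inter, ((pvMemPF m).2 x), ((pvMemPF n).2 x)]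
    constructor
    · rintro ⟨⟨h1, h2, h3, h4⟩, ⟨h5, h6, h7, h8⟩⟩
      exact ⟨h1, h3, h7, h4⟩
    · rintro ⟨h1, h2, h3, h4⟩
      have hxm : x ≤ m := Int.le_of_dvd (by omega) h2
      have hxn : x ≤ n := Int.le_of_dvd (by omega) h3
      exact ⟨⟨h1, by omega, h2, h4⟩, ⟨h1, by omega, h3, h4⟩⟩
  -- fold is the product
  have hfold : L.foldl (fun product i => product * i) 1 = L.prod := by
    rw [List.prod_eq_foldl]
  -- pass to natural numbers
  have hLcast : L = (L.map Int.toNat).map (Nat.cast : Nat → Int) := by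
    rw [List.map_map]
    conv_lhs => rw [← List.map_id L]
    apply List.map_congr_left
    intro x hx
    have := (hmem x).mp hx
    simp [Int.toNat_of_nonneg (by omega : (0:Int) ≤ x)]
  have hLNnodup : (L.map Int.toNat).Nodup := by
    apply List.Nodup.map_on _ hNod
    intro x hx y hy hxy
    have h1 := (hmem x).mp hx
    have h2 := (hmem y).mp hy
    omega
  have hLNmem : ∀ p : Nat, p ∈ L.map Int.toNat ↔ p ∈ (Nat.gcd m.toNat n.toNat).primeFactors := by
    intro p
    rw [List.mem_map, Nat.mem_primeFactors]
    constructor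
    · rintro ⟨x, hx, rfl⟩
      obtain ⟨h1, h2, h3, h4⟩ := (hmem x).mp hx
      refine ⟨h4, Nat.dvd_gcd ?_ ?_, hG0⟩
      · exact ((pvDvdCast x m (by omega) (by omega)).mp h2)
      · exact ((pvDvdCast x n (by omega) (by omega)).mp h3)
    · rintro ⟨hp, hpd, -⟩
      refine ⟨(p : Int), ?_, by simp⟩
      rw [hmem]
      have hpm : p ∣ m.toNat := hpd.trans (Nat.gcd_dvd_left _ _)
      have hpn : p ∣ n.toNat := hpd.trans (Nat.gcd_dvd_right _ _)
      have h2p := hp.two_le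
      refine ⟨by exact_mod_cast h2p, ?_, ?_, by simpa using hp⟩
      · rw [pvDvdCast _ m (by omega) (by omega), Int.toNat_natCast]; exact hpm
      · rw [pvDvdCast _ n (by omega) (by omega), Int.toNat_natCast]; exact hpn
  have hperm : (L.map Int.toNat).Perm (Nat.gcd m.toNat n.toNat).primeFactors.toList := by
    rw [List.perm_ext_iff_of_nodup hLNnodup (Finset.nodup_toList _)]
    intro p
    rw [hLNmem p, Finset.mem_toList]
  calc FindGCD2 m n = L.prod := by rw [hdef, hfold]
    _ = ((L.map Int.toNat).map (Nat.cast : Nat → Int)).prod := by rw [← hLcast]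
    _ = ((L.map Int.toNat).prod : Int) := (Nat.cast_list_prod _).symm
    _ = (((Nat.gcd m.toNat n.toNat).primeFactors.toList.prod : Nat) : Int) := by
        rw [hperm.prod_eq]
    _ = (pvRad (Nat.gcd m.toNat n.toNat) : Int) := by
        rw [Finset.prod_toList]; rfl

theorem pvProdB (m n : Int) (hm : 2 ≤ m) (hn : 2 ≤ n) :
    FindGCD2_alt m n = (pvRad (Nat.gcd m.toNat n.toNat) : Int) := by
  have hgc : euclidLoop (n.toNat + 1) m n = ((Nat.gcd m.toNat n.toNat : Nat) : Int) := by
    rw [pvEuclid (n.toNat + 1) m n (by omega) (by omega) (by omega)]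
    congr 1
    rw [Int.gcd]
    congr 1 <;> omega
  have hG1 : 1 ≤ Nat.gcd m.toNat n.toNat := Nat.gcd_pos_of_pos_left _ (by omega)
  have hres := pvTrial (2 * ((Nat.gcd m.toNat n.toNat : Nat) : Int).toNat + 1)
    ((Nat.gcd m.toNat n.toNat : Nat) : Int) 2 1 (by simp) (by exact_mod_cast hG1) le_rfl
    (fun p hp _ => by exact_mod_cast hp.two_le)
  have hbody : FindGCD2_alt m n =
      (if (trialLoop (2 * (euclidLoop (n.toNat + 1) m n).toNat + 1)
            (euclidLoop (n.toNat + 1) m n) 2 1).1 > 1 then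
        (trialLoop (2 * (euclidLoop (n.toNat + 1) m n).toNat + 1)
            (euclidLoop (n.toNat + 1) m n) 2 1).2 *
          (trialLoop (2 * (euclidLoop (n.toNat + 1) m n).toNat + 1)
            (euclidLoop (n.toNat + 1) m n) 2 1).1
      else (trialLoop (2 * (euclidLoop (n.toNat + 1) m n).toNat + 1)
            (euclidLoop (n.toNat + 1) m n) 2 1).2) := by
    unfold FindGCD2_alt
    rw [if_neg (by omega : ¬(m < 2 ∨ n < 2))]
  rw [hbody, hgc, hres, Int.toNat_natCast, one_mul]

theorem pvA_small (m n : Int) (h : m < 2 ∨ n < 2) : FindGCD2 m n = 1 := by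
  have hdef : FindGCD2 m n =
      (PySem.Set.inter (primeFactorization m) (primeFactorization n)).foldl
        (fun product i => product * i) 1 := rfl
  have hnil : PySem.Set.inter (primeFactorization m) (primeFactorization n) = [] := by
    rw [List.eq_nil_iff_forall_not_mem]
    intro x hx
    rw [PySem.Set.mem_inter] at hx
    rcases h with h | h
    · have := ((pvMemPF m).2 x).mp hx.1; omega
    · have := ((pvMemPF n).2 x).mp hx.2; omega
  rw [hdef, hnil]
  rfl

theorem pvMain (m n : Int) : FindGCD2 m n = FindGCD2_alt m n := by
  by_cases h : m < 2 ∨ n < 2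
  · rw [pvA_small m n h]
    unfold FindGCD2_alt
    rw [if_pos h]
  · push Not at h
    rw [pvProdA m n h.1 h.2, pvProdB m n h.1 h.2]

-- ===== VERDICT (by name: the statement is the Claim_ definition above) =====
theorem FindGCD2_spec : Claim_equal_FindGCD2 := by
  intro m n _
  unfold Spec_FindGCD2
  exact pvMain m n
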